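-- pv_equiv track=rewrite | github.com/lapocarrieri/Intelligent-Decision-Support-System-Project | models/recommendationSystem.py | process_genres
-- ===== SOURCE A (Python) =====
-- def process_genres(string_genres):
--     genres_list = []
--     for i in range(2, len(string_genres)):
--         if string_genres[i-3:i] == ': \'':
--             gen = ''
--             j = i
--             while (string_genres[j] != '\''):
--                 gen += string_genres[j]
--                 j += 1
--             genres_list.append(gen.lower())
--     return genres_list
-- ===== SOURCE B (Python) =====
-- def process_genres(string_genres):
--     genres_list = []
--     i = 0
--     while True:
--         k = string_genres.find(": '", i)
--         if k == -1:
--             return genres_list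
--         j = string_genres.index("'", k + 3)
--         genres_list.append(string_genres[k + 3:j].lower())
--         i = k + 1
-- ===== Notes on version B (the rewrite author's own statement) =====
-- stated objective: faster
-- what changed: Replaces the per-index slice test and character-by-character inner accumulation with str.find jumps between markers and str.index plus a slice to cut out each genre.
-- outside the precondition, e.g. on process_genres("a: 'x': '"): A returns ['x'], B raises ValueError
import Mathlib
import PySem

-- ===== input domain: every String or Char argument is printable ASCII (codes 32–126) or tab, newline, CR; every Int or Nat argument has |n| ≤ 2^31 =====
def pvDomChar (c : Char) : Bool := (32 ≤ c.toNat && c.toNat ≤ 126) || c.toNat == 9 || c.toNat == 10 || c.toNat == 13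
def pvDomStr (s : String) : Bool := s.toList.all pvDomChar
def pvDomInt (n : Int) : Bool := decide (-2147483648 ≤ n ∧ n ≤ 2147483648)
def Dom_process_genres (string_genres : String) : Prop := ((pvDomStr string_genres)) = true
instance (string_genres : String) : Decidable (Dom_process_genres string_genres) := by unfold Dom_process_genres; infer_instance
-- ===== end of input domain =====

-- B replaces A's per-index slice test and char-by-char inner loop by find/index jumps and a slice (idiomatic).
-- ===== PORT A =====
-- the inner `while string_genres[j] != '\'': gen += string_genres[j]; j += 1`:
-- collects chars before the first quote; none = the IndexError Python raises when no quote follows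
def pgGen : List Char → Option (List Char)
  | [] => none
  | c :: cs => if c = '\'' then some [] else (pgGen cs).map (c :: ·)

def process_genres (string_genres : String) : List String :=
  let cs := string_genres.toList
  (PySem.List.pyRange 2 (cs.length : Int) 1).foldl (fun acc i =>
    if PySem.List.slice cs (some (i - 3)) (some i) = [':', ' ', '\''] then
      match pgGen (cs.drop i.toNat) with
      | some g => acc ++ [String.mk (PySem.Chars.lower g)]
      | none => acc   -- Python raises IndexError here (excluded by Pre_)
    else acc) []

-- ===== PORT B =====
-- fuel = cs.length + 1 - i strictly decreases: each found marker k has k ≥ i, next i is k+1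
def pgB (cs : List Char) : Nat → Nat → List String → List String
  | 0, _, acc => acc          -- fuel exhausted (never reached: fuel bounds the scan position)
  | fuel + 1, i, acc =>
    let k := PySem.Chars.findFrom cs [':', ' ', '\''] (i : Int) none
    if k = -1 then acc
    else
      let j := PySem.Chars.findFrom cs ['\''] (k + 3) none
      if j = -1 then acc      -- Python raises ValueError here (excluded by Pre_)
      else pgB cs fuel (k.toNat + 1)
        (acc ++ [String.mk (PySem.Chars.lower (PySem.List.slice cs (some (k + 3)) (some j)))])

def process_genres_alt (string_genres : String) : List String :=
  pgB string_genres.toList (string_genres.toList.length + 1) 0 []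

-- ===== PRECONDITION & SPEC =====
-- Pre_ excludes strings containing a ": '" marker with no closing quote after it: on a
-- non-final such marker A raises IndexError; on a marker ending at the last character A
-- returns without it (its loop stops 3 short) while B raises ValueError, so B raises on
-- exactly the excluded inputs.
def Pre_process_genres (string_genres : String) : Prop :=
  ∀ k : Nat, k < string_genres.toList.length →
    (string_genres.toList.drop k).take 3 = [':', ' ', '\''] →
    '\'' ∈ string_genres.toList.drop (k + 3)
instance (string_genres : String) : Decidable (Pre_process_genres string_genres) := by
  unfold Pre_process_genres; infer_instance
def pvWitness_process_genres : String := "{1: 'Action', 2: 'coMedy'}"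

def Spec_process_genres (string_genres : String) (out : List String) : Prop := out = process_genres_alt string_genres
instance (string_genres : String) (out : List String) : Decidable (Spec_process_genres string_genres out) := by unfold Spec_process_genres; infer_instance

-- ===== CLAIM (what is proved, stated in full; the proofs are below) =====
def Claim_equal_process_genres : Prop := ∀ (string_genres : String), Dom_process_genres string_genres → Pre_process_genres string_genres → Spec_process_genres string_genres (process_genres string_genres)

-- ===== LEMMAS AND PROOFS =====

-- A's loop body, as a function (for stating fold lemmas)
def pgStepA (cs : List Char) (acc : List String) (i : Int) : List String :=
  if PySem.List.slice cs (some (i - 3)) (some i) = [':', ' ', '\''] then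
    match pgGen (cs.drop i.toNat) with
    | some g => acc ++ [String.mk (PySem.Chars.lower g)]
    | none => acc
  else acc

lemma pgGen_eq_takeWhile (l : List Char) (h : '\'' ∈ l) :
    pgGen l = some (l.takeWhile (· ≠ '\'')) := by
  induction l with
  | nil => cases h
  | cons c cs ih =>
    by_cases hc : c = '\''
    · subst hc; simp [pgGen, List.takeWhile]
    · have hm : '\'' ∈ cs := by
        rcases List.mem_cons.mp h with h1 | h1
        · exact absurd h1.symm hc
        · exact h1
      rw [List.takeWhile_cons_of_pos (by simp [hc])]
      simp [pgGen, hc, ih hm]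

lemma takeWhile_eq_take (l : List Char) (n : Nat) (hn : n < l.length)
    (hq : l[n] = '\'') (hlt : ∀ i (hi : i < n), l[i]'(by omega) ≠ '\'') :
    l.takeWhile (· ≠ '\'') = l.take n := by
  induction l generalizing n with
  | nil => simp at hn
  | cons c cs ih =>
    cases n with
    | zero => simp at hq; simp [List.takeWhile, hq]
    | succ m =>
      have hc : c ≠ '\'' := hlt 0 (by omega)
      rw [List.takeWhile_cons_of_pos (by simp [hc]), List.take_succ_cons]
      congr 1
      exact ih m (by simpa using hn) (by simpa using hq)
        (fun i hi => by simpa using hlt (i+1) (by omega))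

lemma foldl_stepA_nil (cs : List Char) (l : List Int) (acc : List String)
    (h : ∀ i ∈ l, PySem.List.slice cs (some (i - 3)) (some i) ≠ [':', ' ', '\'']) :
    l.foldl (pgStepA cs) acc = acc := by
  induction l generalizing acc with
  | nil => rfl
  | cons x xs ih =>
    simp only [List.foldl_cons]
    rw [show pgStepA cs acc x = acc from by
      simp [pgStepA, h x (List.mem_cons_self)]]
    exact ih acc (fun i hi => h i (List.mem_cons_of_mem _ hi))

-- a marker found as a prefix of a drop is an infix of any earlier drop
lemma marker_infix (cs : List Char) (q m : Nat) (hqm : q ≤ m)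
    (h : [':', ' ', '\''] <+: cs.drop m) : [':', ' ', '\''] <:+: cs.drop q := by
  have h2 : cs.drop m = (cs.drop q).drop (m - q) := by
    rw [List.drop_drop]
    congr 1
    omega
  exact h.isInfix.trans (h2 ▸ List.drop_suffix (m - q) (cs.drop q)).isInfix

-- a singleton prefix of a drop pins the character at that index
lemma singleton_prefix_drop (cs : List Char) (c : Char) (n : Nat)
    (h : [c] <+: cs.drop n) : ∃ hn : n < cs.length, cs[n] = c := by
  obtain ⟨t, ht⟩ := h
  have hlen : (cs.drop n).length = t.length + 1 := by
    rw [← ht]; simp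
  have hn : n < cs.length := by simp at hlen; omega
  refine ⟨hn, ?_⟩
  rw [List.drop_eq_getElem_cons hn] at ht
  exact (List.cons.injEq _ _ _ _ ▸ ht).1.symm

lemma main_loop (cs : List Char) (hpre : ∀ k : Nat, k < cs.length →
      (cs.drop k).take 3 = [':', ' ', '\''] → '\'' ∈ cs.drop (k + 3)) :
    ∀ fuel q acc, q ≤ cs.length → cs.length + 1 - q ≤ fuel →
    (PySem.List.pyRange ((q : Int) + 3) (cs.length : Int) 1).foldl (pgStepA cs) acc
      = pgB cs fuel q acc := by
  intro fuel
  induction fuel with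
  | zero => intro q acc hq hf; omega
  | succ fuel ih =>
    intro q acc hq hf
    simp only [pgB]
    set k := PySem.Chars.findFrom cs [':', ' ', '\''] (q : Int) none with hk
    by_cases hkneg : k = -1
    · rw [if_pos hkneg]
      -- no marker at any position ≥ q: every slice test in A's remaining range fails
      have hno : ¬ [':', ' ', '\''] <:+: cs.drop q :=
        (PySem.Chars.findFrom_natCast_eq_neg_one_iff cs [':', ' ', '\''] q hq).mp (hk ▸ hkneg)
      apply foldl_stepA_nil
      intro i hi hsl
      rw [PySem.List.mem_pyRange_one] at hi
      obtain ⟨hi1, hi2⟩ := hi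
      rw [PySem.List.slice_toNat cs (by omega) (by omega)] at hsl
      have hpref : [':', ' ', '\''] <+: cs.drop (i-3).toNat :=
        hsl ▸ List.take_prefix _ _
      exact hno (marker_infix cs q (i-3).toNat (by omega) hpref)
    · rw [if_neg hkneg]
      obtain ⟨hqk, hkpref, hkmin⟩ :=
        PySem.Chars.findFrom_natCast_spec cs [':', ' ', '\''] q hq (hk ▸ hkneg)
      have hk0 : (0:Int) ≤ k := le_trans (by exact_mod_cast Nat.zero_le q) hqk
      set kn := k.toNat with hkn
      have hkint : k = (kn : Int) := by omega
      have hkq : q ≤ kn := by omega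
      have hklen : kn + 3 ≤ cs.length := by
        have h1 := hkpref.length_le
        simp at h1
        omega
      have hmark : (cs.drop kn).take 3 = [':', ' ', '\''] := by
        have h1 := List.prefix_iff_eq_take.mp hkpref
        exact h1.symm
      have hquote : '\'' ∈ cs.drop (kn + 3) := hpre kn (by omega) hmark
      -- the quote search succeeds
      set j := PySem.Chars.findFrom cs ['\''] (k + 3) none with hj
      have hk3 : (k + 3 : Int) = ((kn + 3 : Nat) : Int) := by omega
      have hjne : j ≠ -1 := by
        rw [hj, hk3]
        intro hcon
        have h1 := (PySem.Chars.findFrom_natCast_eq_neg_one_iff cs ['\''] (kn+3) hklen).mp hcon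
        apply h1
        obtain ⟨pre, suf, hps⟩ := List.append_of_mem hquote
        exact ⟨pre, suf, by simpa using hps.symm⟩
      rw [if_neg hjne]
      obtain ⟨hjk, hjpref, hjmin⟩ := by
        have h1 := PySem.Chars.findFrom_natCast_spec cs ['\''] (kn+3) hklen
          (by rw [← hk3, ← hj]; exact hjne)
        rwa [← hk3, ← hj] at h1
      have hj0 : (0:Int) ≤ j := le_trans (by positivity) hjk
      set jn := j.toNat with hjn
      have hjint : j = (jn : Int) := by omega
      obtain ⟨hjlen, hjq⟩ := singleton_prefix_drop cs '\'' jn hjpref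
      have hkj : kn + 3 ≤ jn := by omega
      -- split A's range: [q+3, kn+3) ++ (kn+3) :: [kn+4, len)
      have hsplit1 : PySem.List.pyRange ((q:Int)+3) (cs.length:Int) 1
          = PySem.List.pyRange ((q:Int)+3) ((kn:Int)+3) 1
            ++ PySem.List.pyRange ((kn:Int)+3) (cs.length:Int) 1 :=
        PySem.List.pyRange_one_append _ _ _ (by push_cast; omega) (by push_cast; omega)
      have hsplit2 : PySem.List.pyRange ((kn:Int)+3) (cs.length:Int) 1
          = ((kn:Int)+3) :: PySem.List.pyRange ((kn:Int)+4) (cs.length:Int) 1 := by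
        rw [PySem.List.pyRange_one_cons (by push_cast; omega),
          show ((kn:Int)+3+1) = ((kn:Int)+4) from by ring]
      rw [hsplit1, List.foldl_append, hsplit2, List.foldl_cons]
      -- first stretch: no marker at any position in [q, kn)
      rw [foldl_stepA_nil cs _ acc (by
        intro i hi hsl
        rw [PySem.List.mem_pyRange_one] at hi
        obtain ⟨hi1, hi2⟩ := hi
        rw [PySem.List.slice_toNat cs (by omega) (by omega)] at hsl
        have hpref : [':', ' ', '\''] <+: cs.drop (i-3).toNat :=
          hsl ▸ List.take_prefix _ _
        exact hkmin ((i-3).toNat) (by omega) (by omega) hpref)]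
      -- the marker step equals B's appended element
      have hstep : pgStepA cs acc ((kn:Int)+3)
          = acc ++ [String.mk (PySem.Chars.lower (PySem.List.slice cs (some (k + 3)) (some j)))] := by
        have hsl : PySem.List.slice cs (some ((kn:Int)+3-3)) (some ((kn:Int)+3))
            = [':', ' ', '\''] := by
          rw [PySem.List.slice_toNat cs (by omega) (by omega),
            show (((kn:Int)+3-3)).toNat = kn from by omega,
            show (((kn:Int)+3)).toNat = kn + 3 from by omega,
            show kn + 3 - kn = 3 from by omega]
          exact hmark
        have hdrop : (((kn:Int)+3).toNat) = kn + 3 := by omega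
        have hgen : pgGen (cs.drop (kn+3)) = some ((cs.drop (kn+3)).takeWhile (· ≠ '\'')) :=
          pgGen_eq_takeWhile _ hquote
        have htw : (cs.drop (kn+3)).takeWhile (· ≠ '\'') = (cs.drop (kn+3)).take (jn - (kn+3)) := by
          refine takeWhile_eq_take _ _ (by simp; omega) ?_ ?_
          · simp only [List.getElem_drop]
            simp only [show kn + 3 + (jn - (kn+3)) = jn from by omega]
            exact hjq
          · intro i hi hcon
            simp only [List.getElem_drop] at hcon
            have hb : kn + 3 + i < cs.length := by
              have := hjlen; omega
            apply hjmin (kn + 3 + i) (by omega) (by omega)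
            exact ⟨cs.drop (kn+3+i+1), by rw [List.drop_eq_getElem_cons hb, hcon]; rfl⟩
        have hslB : PySem.List.slice cs (some (k + 3)) (some j)
            = (cs.drop (kn+3)).take (jn - (kn+3)) := by
          rw [PySem.List.slice_toNat cs (by omega) (by omega)]
          rw [show ((k+3)).toNat = kn + 3 from by omega]
        simp only [pgStepA]
        rw [if_pos hsl, hdrop, hgen, htw, hslB]
      rw [hstep]
      -- remaining range = B's recursive call (IH at q' = kn + 1)
      have hrec := ih (kn + 1)
        (acc ++ [String.mk (PySem.Chars.lower (PySem.List.slice cs (some (k + 3)) (some j)))])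
        (by omega) (by omega)
      rw [show ((kn:Int)+4) = (((kn+1 : Nat)):Int) + 3 from by push_cast; ring]
      exact hrec

-- the i = 2 term of A's loop never matches (its slice is empty for len ≥ 3)
lemma stepA_two (cs : List Char) (h3 : 3 ≤ cs.length) (acc : List String) :
    pgStepA cs acc 2 = acc := by
  unfold pgStepA
  rw [if_neg]
  intro hcon
  have hlen := congrArg List.length hcon
  rw [PySem.List.length_slice] at hlen
  rw [show (2 - 3 : Int) = -1 from by norm_num,
    show (2 : Int) = ((2 : Nat) : Int) from by norm_num,
    PySem.List.clampIdx_natCast, PySem.List.clampIdx_neg_one] at hlen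
  simp at hlen
  omega

-- ===== VERDICT (by name: the statement is the Claim_ definition above) =====
theorem process_genres_spec : Claim_equal_process_genres := by
  intro s _ hpre
  unfold Spec_process_genres process_genres process_genres_alt
  set cs := s.toList with hcs
  show (PySem.List.pyRange 2 (cs.length : Int) 1).foldl (pgStepA cs) [] = pgB cs (cs.length + 1) 0 []
  by_cases h3 : 3 ≤ cs.length
  · rw [PySem.List.pyRange_one_append 2 3 (cs.length : Int) (by norm_num) (by exact_mod_cast h3),
      List.foldl_append,
      PySem.List.pyRange_one_cons (by norm_num : (2:Int) < 3),
      PySem.List.pyRange_one_eq_nil (by norm_num : (3:Int) ≤ 2 + 1)]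
    simp only [List.foldl_cons, List.foldl_nil]
    rw [stepA_two cs h3]
    have := main_loop cs (fun k hk => hpre k hk) (cs.length + 1) 0 [] (Nat.zero_le _) (by omega)
    simpa using this
  · -- len < 3: A's range is empty and B finds no marker
    rw [PySem.List.pyRange_one_eq_nil (by exact_mod_cast by omega)]
    simp only [List.foldl_nil]
    cases hf : cs.length + 1 with
    | zero => simp at hf
    | succ n =>
      simp only [pgB]
      rw [if_pos]
      have : ¬ [':', ' ', '\''] <:+: cs.drop 0 := by
        intro hcon
        have := hcon.length_le
        simp at this
        omega
      exact (PySem.Chars.findFrom_natCast_eq_neg_one_iff cs [':', ' ', '\''] 0 (Nat.zero_le _)).mpr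
        (by simpa using this)
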